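-- pv_equiv track=rewrite | github.com/blkbltjns/code_jam | vestigium/run.py | get_num_repeated_rows
-- ===== SOURCE A (Python) =====
-- def get_num_repeated_rows(a):
--     n = len(a)
--     num_repeated_rows = 0
--     for i in range(0, n):
--         s = set()
--
--         for j in range(0, n):
--             value = a[i][j]
--             if (value in s):
--                 num_repeated_rows += 1
--                 break
--             s.add(value)
--
--     return num_repeated_rows
-- ===== SOURCE B (Python) =====
-- def get_num_repeated_rows(a):
--     # A row is "repeated" iff sorting its first n entries brings two equal
--     # values next to each other: sort each row slice, then scan adjacent pairs.
--     n = len(a)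
--     count = 0
--     for row in a:
--         r = sorted(row[:n])
--         if any(x == y for x, y in zip(r, r[1:])):
--             count += 1
--     return count
-- ===== Notes on version B (the rewrite author's own statement) =====
-- stated objective: alternative
-- what changed: Replaces A's per-row set with membership tests and early break by sort-then-scan: each row's first n entries are sorted and adjacent pairs are compared for equality.
import Mathlib
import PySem

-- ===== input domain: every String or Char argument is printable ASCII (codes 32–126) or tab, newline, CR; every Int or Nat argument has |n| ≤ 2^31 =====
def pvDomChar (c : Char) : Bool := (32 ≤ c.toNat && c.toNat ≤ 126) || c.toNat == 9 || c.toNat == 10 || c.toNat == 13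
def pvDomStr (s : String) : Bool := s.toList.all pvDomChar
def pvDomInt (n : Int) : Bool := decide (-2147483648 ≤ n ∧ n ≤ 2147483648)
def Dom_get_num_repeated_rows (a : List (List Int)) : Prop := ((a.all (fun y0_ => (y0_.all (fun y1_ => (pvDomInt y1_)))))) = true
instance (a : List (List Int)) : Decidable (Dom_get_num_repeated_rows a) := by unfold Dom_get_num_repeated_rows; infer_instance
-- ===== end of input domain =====

-- B replaces A's per-row set with membership tests and early break by sort-then-scan:
-- each row's first n entries are sorted and adjacent pairs compared for equality (objective: alternative).

-- ===== PORT A =====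
-- inner 'for j in range(0, n)' loop of A: returns 1 if it breaks on a repeated value, else 0
-- (the 'num_repeated_rows += 1; break' is the returned 1, added by the outer fold);
-- a[i][j] out of range (IndexError) is pyGet? = none: the port returns 0 there, unreachable under Pre_.
def pvInnerA (row : List Int) (s : PySem.Set Int) : List Int → Int
  | [] => 0
  | j :: js =>
    match PySem.List.pyGet? row j with
    | none => 0
    | some v => if PySem.Set.contains s v then 1 else pvInnerA row (PySem.Set.add s v) js

def get_num_repeated_rows (a : List (List Int)) : Int :=
  let n : Int := a.length
  (PySem.List.pyRange 0 n 1).foldl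
    (fun num_repeated_rows i =>
      num_repeated_rows + pvInnerA (PySem.List.pyGetD a i []) PySem.Set.empty (PySem.List.pyRange 0 n 1))
    0

-- ===== PORT B =====
-- 'any(x == y for x, y in zip(r, r[1:]))': scan adjacent pairs of r
def pvHasAdjDup : List Int → Bool
  | [] => false
  | [_] => false
  | x :: y :: rest => x == y || pvHasAdjDup (y :: rest)

def get_num_repeated_rows_alt (a : List (List Int)) : Int :=
  let n : Int := a.length
  a.foldl
    (fun count row =>
      let r := PySem.List.sorted (PySem.List.slice row none (some n)) (fun x => x) false
      if pvHasAdjDup r then count + 1 else count)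
    0

-- ===== PRECONDITION & SPEC =====
-- Pre_ excludes exactly the inputs on which the Python A raises IndexError: some row shorter
-- than len(a) whose own entries are all distinct (A's inner loop then indexes past the row's end).
def Pre_get_num_repeated_rows (a : List (List Int)) : Prop :=
  ∀ r ∈ a, a.length ≤ r.length ∨ ¬ r.Nodup
instance (a : List (List Int)) : Decidable (Pre_get_num_repeated_rows a) := by
  unfold Pre_get_num_repeated_rows; infer_instance
def pvWitness_get_num_repeated_rows : List (List Int) := [[1, 2], [3, 3]]

def Spec_get_num_repeated_rows (a : List (List Int)) (out : Int) : Prop := out = get_num_repeated_rows_alt a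
instance (a : List (List Int)) (out : Int) : Decidable (Spec_get_num_repeated_rows a out) := by unfold Spec_get_num_repeated_rows; infer_instance

-- ===== CLAIM (what is proved, stated in full; the proofs are below) =====
def Claim_equal_get_num_repeated_rows : Prop := ∀ (a : List (List Int)), Dom_get_num_repeated_rows a → Pre_get_num_repeated_rows a → Spec_get_num_repeated_rows a (get_num_repeated_rows a)

-- ===== LEMMAS AND PROOFS =====

-- straight-line form of A's inner loop over the row's elements themselves
def pvElems (s : PySem.Set Int) : List Int → Int
  | [] => 0
  | v :: vs => if PySem.Set.contains s v then 1 else pvElems (PySem.Set.add s v) vs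

lemma pvInnerA_eq_pvElems (row : List Int) :
    ∀ (m k : ℕ) (s : PySem.Set Int),
      pvInnerA row s (PySem.List.pyRange (k : Int) ((k : Int) + (m : Int)) 1)
        = pvElems s ((row.drop k).take m) := by
  intro m
  induction m with
  | zero =>
    intro k s
    rw [PySem.List.pyRange_one_eq_nil (by omega)]
    simp [pvInnerA, pvElems]
  | succ m ih =>
    intro k s
    rw [PySem.List.pyRange_one_cons (by push_cast; omega)]
    simp only [pvInnerA, PySem.List.pyGet?_natCast]
    cases hk : row[k]? with
    | none =>
      have hge : row.length ≤ k := by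
        by_contra h
        push Not at h
        rw [List.getElem?_eq_getElem h] at hk
        cases hk
      rw [List.drop_of_length_le hge]
      simp [pvElems]
    | some v =>
      have hlt : k < row.length := by
        by_contra h
        rw [List.getElem?_eq_none (by omega)] at hk; exact absurd hk (by simp)
      have hv : row[k] = v := by
        rw [List.getElem?_eq_getElem hlt] at hk
        exact Option.some_inj.mp hk
      rw [List.drop_eq_getElem_cons hlt, hv, List.take_succ_cons]
      by_cases hm : v ∈ s
      · simp [pvElems, hm]
      · simp only [pvElems]
        rw [if_neg (by simpa using hm), if_neg (by simpa using hm)]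
        rw [show ((k:Int) + ((m:ℕ)+(1:ℕ):ℕ)) = ((k+1:ℕ):Int) + (m:ℕ) by push_cast; ring]
        exact ih (k + 1) (PySem.Set.add s v)

-- pvElems on a nodup accumulator returns 1 exactly when s ++ vs has a duplicate
lemma pvElems_nodup_char (vs : List Int) : ∀ (s : PySem.Set Int), s.Nodup →
    pvElems s vs = if (s ++ vs).Nodup then 0 else 1 := by
  induction vs with
  | nil => intro s hs; simp [pvElems, hs]
  | cons v vs ih =>
    intro s hs
    simp only [pvElems]
    by_cases hv : v ∈ s
    · have hc : PySem.Set.contains s v = true := by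
        rw [PySem.Set.contains_iff]; exact hv
      rw [if_pos hc, if_neg]
      intro hnd
      rw [List.nodup_append] at hnd
      exact hnd.2.2 v hv v (by simp) rfl
    · have hc : ¬ PySem.Set.contains s v = true := by
        rw [PySem.Set.contains_iff]; exact hv
      have hnd1 : (s ++ [v]).Nodup := by
        rw [List.nodup_append]
        exact ⟨hs, List.nodup_singleton v, fun a ha b hb => by simp at hb; exact fun h => hv ((h.trans hb) ▸ ha)⟩
      rw [if_neg hc, PySem.Set.add_of_not_mem hv, ih (s ++ [v]) hnd1]
      have hperm : (s ++ [v] ++ vs).Perm (s ++ v :: vs) := by simp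
      exact if_congr hperm.nodup_iff rfl rfl

-- a (≤)-sorted list has an adjacent duplicate iff it has a duplicate at all
lemma hasAdjDup_char : ∀ (l : List Int), l.Pairwise (· ≤ ·) →
    (pvHasAdjDup l = true ↔ ¬ l.Nodup) := by
  intro l
  induction l with
  | nil => intro _; simp [pvHasAdjDup]
  | cons x t ih =>
    intro hp
    cases t with
    | nil => simp [pvHasAdjDup]
    | cons y rest =>
      have hp' : (y :: rest).Pairwise (· ≤ ·) := hp.tail
      simp only [pvHasAdjDup, Bool.or_eq_true, beq_iff_eq, ih hp', List.nodup_cons]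
      constructor
      · rintro (h | h)
        · intro ⟨hx, _⟩; exact hx (by simp [h])
        · intro ⟨_, hnd⟩; exact h hnd
      · intro h
        by_cases hxy : x = y
        · exact Or.inl hxy
        · right
          intro hnd
          apply h
          refine ⟨?_, hnd⟩
          intro hmem
          rcases List.mem_cons.mp hmem with hmem | hmem
          · exact hxy hmem
          · -- x = some z in rest; but x ≤ y ≤ z forces x = y
            have hxley : x ≤ y := (List.pairwise_cons.mp hp).1 y (by simp)
            have hylez : y ≤ x := by
              have := (List.pairwise_cons.mp hp').1 x hmem
              exact this
            exact hxy (le_antisymm hxley hylez)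

-- per-row agreement: A's inner result = B's sort-and-scan result (unconditionally)
lemma row_eq (n : ℕ) (row : List Int) :
    pvInnerA row PySem.Set.empty (PySem.List.pyRange 0 (n : Int) 1)
      = if pvHasAdjDup (PySem.List.sorted (PySem.List.slice row none (some (n : Int))) (fun x => x) false)
        then (1 : Int) else 0 := by
  have hA : pvInnerA row PySem.Set.empty (PySem.List.pyRange 0 (n : Int) 1)
      = pvElems PySem.Set.empty (row.take n) := by
    have := pvInnerA_eq_pvElems row n 0 PySem.Set.empty
    simpa using this
  rw [hA, pvElems_nodup_char _ _ (by simp [PySem.Set.empty]), PySem.List.slice_to_natCast]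
  have hpair : (PySem.List.sorted (row.take n) (fun x => x) false).Pairwise (· ≤ ·) := by
    simpa using PySem.List.sorted_pairwise (xs := row.take n) (key := fun x => x)
  have hperm : (PySem.List.sorted (row.take n) (fun x => x) false).Perm (row.take n) :=
    PySem.List.sorted_perm _ _ _
  rw [show (PySem.Set.empty ++ row.take n : List Int) = row.take n from by simp [PySem.Set.empty]]
  by_cases hnd : (row.take n).Nodup
  · rw [if_pos hnd, if_neg]
    intro hadj
    exact ((hasAdjDup_char _ hpair).mp hadj) (hperm.nodup_iff.mpr hnd)
  · rw [if_neg hnd, if_pos]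
    exact (hasAdjDup_char _ hpair).mpr (fun h => hnd (hperm.nodup_iff.mp h))

lemma foldl_add_map (g : List Int → Int) (l : List (List Int)) : ∀ (c : Int),
    l.foldl (fun acc r => acc + g r) c = c + (l.map g).sum := by
  induction l with
  | nil => intro c; simp
  | cons r l ih => intro c; simp [List.foldl_cons, ih]; ring

lemma foldl_if_add_map (g : List Int → Bool) (l : List (List Int)) : ∀ (c : Int),
    l.foldl (fun acc r => if g r then acc + 1 else acc) c
      = c + (l.map (fun r => if g r then (1 : Int) else 0)).sum := by
  induction l with
  | nil => intro c; simp
  | cons r l ih =>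
    intro c
    simp only [List.foldl_cons, List.map_cons, List.sum_cons, ih]
    by_cases h : g r
    · simp only [h, if_true]; ring
    · simp [h]

-- ===== VERDICT (by name: the statement is the Claim_ definition above) =====
theorem get_num_repeated_rows_spec : Claim_equal_get_num_repeated_rows := by
  intro a _ _
  unfold Spec_get_num_repeated_rows get_num_repeated_rows get_num_repeated_rows_alt
  simp only []
  rw [PySem.List.foldl_pyRange_zero_pyGetD'
        (f := fun acc row => acc + pvInnerA row PySem.Set.empty (PySem.List.pyRange 0 (a.length : Int) 1))
        (d := ([] : List Int)) (init := (0 : Int))]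
  rw [foldl_add_map, foldl_if_add_map]
  congr 1
  apply congrArg List.sum
  apply List.map_congr_left
  intro row _
  exact row_eq a.length row
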